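-- pv_equiv track=rewrite | github.com/Hablutzel/smartp | main.py | get_ideal_v1
-- ===== SOURCE A (Python) =====
-- FS = [13, 21, 43, 31, 41, 24, 23, 23 , 12]  # CANTIDAD DE SPOTS LIBRES POR ZONA
--
-- def is_available(zona):
--     if FS[zona] > 0:
--         return True
--     else:
--         return False
--
-- def get_ideal_v1(zonas, skip=[]):
--     z = -1
--     indexs = sorted(range(len(zonas)), key=zonas.__getitem__)
--     for i in indexs:
--         if i not in skip:
--             if is_available(i):
--                 z = i
--                 break
--     return z
-- ===== SOURCE B (Python) =====
-- FS = [13, 21, 43, 31, 41, 24, 23, 23, 12]  # CANTIDAD DE SPOTS LIBRES POR ZONA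
--
-- def is_available(zona):
--     return 0 <= zona < len(FS) and FS[zona] > 0
--
-- def get_ideal_v1(zonas, skip=[]):
--     # only zones 0..len(FS)-1 can ever be available, so only the first len(FS) entries matter
--     skipset = set(skip)
--     best = -1
--     best_v = 0
--     for i, v in enumerate(zonas[:len(FS)]):
--         if i not in skipset and is_available(i) and (best == -1 or v < best_v):
--             best, best_v = i, v
--     return best
-- ===== Notes on version B (the rewrite author's own statement) =====
-- stated objective: alternative
-- what changed: A sorts range(len(zonas)) by value and scans the sorted indices for the first unskipped available one; B does no sort: since only zones 0..len(FS)-1 can be available, it makes one pass over enumerate(zonas[:len(FS)]) keeping the best valid candidate (skip as a set, strict-less tie-break).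
import Mathlib
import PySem

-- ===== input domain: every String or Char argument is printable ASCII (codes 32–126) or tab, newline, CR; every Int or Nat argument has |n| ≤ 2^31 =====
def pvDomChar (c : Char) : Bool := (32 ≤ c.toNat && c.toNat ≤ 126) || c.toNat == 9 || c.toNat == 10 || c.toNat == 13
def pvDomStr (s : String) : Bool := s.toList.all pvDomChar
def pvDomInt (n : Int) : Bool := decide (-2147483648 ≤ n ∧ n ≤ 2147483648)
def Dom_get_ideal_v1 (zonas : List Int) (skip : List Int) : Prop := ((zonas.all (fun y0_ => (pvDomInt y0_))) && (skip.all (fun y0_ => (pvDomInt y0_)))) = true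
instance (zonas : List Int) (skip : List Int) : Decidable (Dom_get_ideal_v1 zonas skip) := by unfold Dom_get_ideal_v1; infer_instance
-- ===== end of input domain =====

-- B replaces A's sort-then-scan (sorted(range(n), key=...) + first-hit loop) by one bounded
-- scan of zonas[:len(FS)] tracking the best valid candidate with a strict-less tie-break.


-- ===== PORT A =====
def FS : List Int := [13, 21, 43, 31, 41, 24, 23, 23, 12]

-- FS[zona] > 0; none = the IndexError of FS[zona]
def is_available (zona : Int) : Option Bool :=
  match PySem.List.pyGet? FS zona with
  | none => none
  | some v => some (decide (v > 0))

-- A's for-loop with break over the sorted index list; none = IndexError propagating out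
def getIdealLoop (skip : List Int) (l : List Int) (z : Int) : Option Int :=
  match l with
  | [] => some z
  | i :: rest =>
    if i ∈ skip then getIdealLoop skip rest z
    else
      match is_available i with
      | none => none
      | some true => some i
      | some false => getIdealLoop skip rest z

-- key zonas.__getitem__ is only applied to indices of range(len(zonas)), all in range,
-- so the total pyGetD with default 0 is exact here
def get_ideal_v1 (zonas : List Int) (skip : List Int) : Int :=
  let indexs := PySem.List.sorted (PySem.List.pyRange 0 zonas.length 1)
      (fun i => PySem.List.pyGetD zonas i 0) false
  (getIdealLoop skip indexs (-1)).getD (-1)   -- the none (IndexError) case is outside Pre_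

-- ===== PORT B =====
def FS_b : List Int := [13, 21, 43, 31, 41, 24, 23, 23, 12]

-- 0 <= zona < len(FS) and FS[zona] > 0 (the guard keeps the subscript in range, so pyGetD is exact)
def is_available_b (zona : Int) : Bool :=
  decide (0 ≤ zona) && decide (zona < (FS_b.length : Int)) && decide (0 < PySem.List.pyGetD FS_b zona 0)

-- only zones 0..len(FS)-1 can ever be available, so only zonas[:len(FS)] matters
def get_ideal_v1_alt (zonas : List Int) (skip : List Int) : Int :=
  let skipset : PySem.Set Int := PySem.Set.ofList skip
  let r := (PySem.List.enumerate (PySem.List.slice zonas none (some (FS_b.length : Int))) 0).foldl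
    (fun (st : Int × Int) iv =>
      if !(PySem.Set.contains skipset iv.1) && is_available_b iv.1
          && (st.1 == -1 || decide (iv.2 < st.2)) then iv else st)
    (-1, 0)
  r.1

-- ===== PRECONDITION & SPEC =====
-- Pre_ holds exactly where A returns: either every index is skipped (A returns -1), or the
-- (value, index)-lexicographically least unskipped index is < 9 = len(FS) (A returns it);
-- otherwise A's is_available indexes FS out of range and raises IndexError.
def Pre_get_ideal_v1 (zonas : List Int) (skip : List Int) : Prop :=
  (∀ i < zonas.length, (i : Int) ∈ skip) ∨
  (∃ j < zonas.length, j < 9 ∧ (j : Int) ∉ skip ∧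
    ∀ i < zonas.length, (i : Int) ∉ skip →
      (zonas.getD j 0 < zonas.getD i 0 ∨ (zonas.getD j 0 = zonas.getD i 0 ∧ j ≤ i)))
instance (zonas : List Int) (skip : List Int) : Decidable (Pre_get_ideal_v1 zonas skip) := by
  unfold Pre_get_ideal_v1; infer_instance

def pvWitness_get_ideal_v1 : List Int × List Int := ([3, 1, 2], [0])


def Spec_get_ideal_v1 (zonas : List Int) (skip : List Int) (out : Int) : Prop := out = get_ideal_v1_alt zonas skip
instance (zonas : List Int) (skip : List Int) (out : Int) : Decidable (Spec_get_ideal_v1 zonas skip out) := by unfold Spec_get_ideal_v1; infer_instance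

-- ===== CLAIM (what is proved, stated in full; the proofs are below) =====
def Claim_equal_get_ideal_v1 : Prop := ∀ (zonas : List Int) (skip : List Int), Dom_get_ideal_v1 zonas skip → Pre_get_ideal_v1 zonas skip → Spec_get_ideal_v1 zonas skip (get_ideal_v1 zonas skip)


-- ===== LEMMAS AND PROOFS =====

-- (value, index) lexicographic order on indices, the order A's stable sort realises
def lexKey (zonas : List Int) (a b : Int) : Prop :=
  PySem.List.pyGetD zonas a 0 < PySem.List.pyGetD zonas b 0 ∨
  (PySem.List.pyGetD zonas a 0 = PySem.List.pyGetD zonas b 0 ∧ a < b)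

lemma avail_lt9 (j : Nat) (hj : j < 9) : is_available (j : Int) = some true := by
  interval_cases j <;> decide

lemma availb_lt9 (j : Nat) (hj : j < 9) : is_available_b (j : Int) = true := by
  interval_cases j <;> decide

lemma loopA_all_skip (skip : List Int) (l : List Int) (z : Int)
    (h : ∀ i ∈ l, i ∈ skip) : getIdealLoop skip l z = some z := by
  induction l with
  | nil => rfl
  | cons i rest ih =>
    have hi : i ∈ skip := h i (List.mem_cons_self ..)
    simp [getIdealLoop, hi, ih (fun x hx => h x (List.mem_cons_of_mem _ hx))]

lemma loopA_first (zonas skip : List Int) (l : List Int) (z jz : Int)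
    (hpw : l.Pairwise (lexKey zonas))
    (hjmem : jz ∈ l) (hjskip : jz ∉ skip) (havail : is_available jz = some true)
    (hmin : ∀ i ∈ l, i ∉ skip →
      (PySem.List.pyGetD zonas jz 0 < PySem.List.pyGetD zonas i 0 ∨
       (PySem.List.pyGetD zonas jz 0 = PySem.List.pyGetD zonas i 0 ∧ jz ≤ i))) :
    getIdealLoop skip l z = some jz := by
  induction l with
  | nil => exact absurd hjmem (by simp)
  | cons i rest ih =>
    rcases List.pairwise_cons.mp hpw with ⟨hhead, htail⟩
    by_cases hskip : i ∈ skip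
    · have hne : jz ≠ i := fun h => hjskip (h ▸ hskip)
      have hjrest : jz ∈ rest := by
        rcases List.mem_cons.mp hjmem with h | h
        · exact absurd h hne
        · exact h
      simp only [getIdealLoop, if_pos hskip]
      exact ih htail hjrest (fun x hx hs => hmin x (List.mem_cons_of_mem _ hx) hs)
    · have hi : i = jz := by
        by_contra hne
        have hjrest : jz ∈ rest := by
          rcases List.mem_cons.mp hjmem with h | h
          · exact absurd h.symm hne
          · exact h
        have h1 := hhead jz hjrest
        have h2 := hmin i (List.mem_cons_self ..) hskip
        rcases h1 with h1 | ⟨h1, h1'⟩ <;> rcases h2 with h2 | ⟨h2, h2'⟩ <;> omega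
      subst hi
      simp [getIdealLoop, hskip, havail]

lemma insertBy_lex (zonas : List Int) (x : Int) (acc : List Int)
    (hpw : acc.Pairwise (lexKey zonas)) (hlt : ∀ a ∈ acc, a < x) :
    (PySem.List.insertBy
        (fun a b => decide (PySem.List.pyGetD zonas a 0 < PySem.List.pyGetD zonas b 0)) x acc).Pairwise
      (lexKey zonas) := by
  induction acc with
  | nil => simp [PySem.List.insertBy]
  | cons y ys ih =>
    rcases List.pairwise_cons.mp hpw with ⟨hhead, htail⟩
    simp only [PySem.List.insertBy]
    split_ifs with hxy
    · refine List.pairwise_cons.mpr ⟨?_, hpw⟩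
      intro z hz
      rcases List.mem_cons.mp hz with rfl | hz
      · exact Or.inl (by simpa using hxy)
      · have := hhead z hz
        rcases this with h | ⟨h, _⟩
        · exact Or.inl (by simp at hxy; omega)
        · exact Or.inl (by simp at hxy; omega)
    · refine List.pairwise_cons.mpr ⟨?_, ih htail (fun a ha => hlt a (List.mem_cons_of_mem _ ha))⟩
      intro z hz
      rw [PySem.List.mem_insertBy] at hz
      rcases hz with h | hz
      · subst h
        have hyx : ¬ PySem.List.pyGetD zonas z 0 < PySem.List.pyGetD zonas y 0 := by simpa using hxy
        have hylt : y < z := hlt y (List.mem_cons_self ..)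
        rcases lt_or_eq_of_le (not_lt.mp hyx) with h2 | h2
        · exact Or.inl h2
        · exact Or.inr ⟨h2, hylt⟩
      · exact hhead z hz

lemma foldl_insertBy_lex (zonas : List Int) (xs acc : List Int)
    (hacc : acc.Pairwise (lexKey zonas))
    (hsep : ∀ a ∈ acc, ∀ y ∈ xs, a < y)
    (hxs : xs.Pairwise (· < ·)) :
    (xs.foldl (fun acc x =>
        PySem.List.insertBy
          (fun a b => decide (PySem.List.pyGetD zonas a 0 < PySem.List.pyGetD zonas b 0)) x acc) acc).Pairwise
      (lexKey zonas) := by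
  induction xs generalizing acc with
  | nil => exact hacc
  | cons x rest ih =>
    rcases List.pairwise_cons.mp hxs with ⟨hhead, htail⟩
    refine ih _ (insertBy_lex zonas x acc hacc (fun a ha => hsep a ha x (List.mem_cons_self ..))) ?_ htail
    intro a ha y hy
    rw [PySem.List.mem_insertBy] at ha
    rcases ha with h | ha
    · subst h
      exact hhead y hy
    · exact hsep a ha y (List.mem_cons_of_mem _ hy)

lemma sorted_range_lex (zonas : List Int) (n : Int) :
    (PySem.List.sorted (PySem.List.pyRange 0 n 1)
        (fun i => PySem.List.pyGetD zonas i 0) false).Pairwise (lexKey zonas) := by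
  rw [PySem.List.sorted_eq_foldl_insertBy]
  exact foldl_insertBy_lex zonas _ [] (by simp) (by simp) (PySem.List.pairwise_lt_pyRange_one 0 n)

-- B's fold returns the (value, index)-least valid candidate
lemma foldB_min (p : Int → Bool) (j vj : Int) (hjp : p j = true) (hjne : j ≠ -1) :
    ∀ (l : List (Int × Int)) (b bv : Int),
      l.Pairwise (fun a b => a.1 < b.1) →
      (b = -1 ∨ ∀ iv ∈ l, b < iv.1) →
      ((j, vj) ∈ l.filter (fun iv => p iv.1) ∨ (b = j ∧ bv = vj)) →
      (∀ iv ∈ l.filter (fun iv => p iv.1), vj < iv.2 ∨ (vj = iv.2 ∧ j ≤ iv.1)) →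
      (b = -1 ∨ (vj < bv ∨ (vj = bv ∧ j ≤ b))) →
      (l.foldl (fun st iv =>
        if p iv.1 && (st.1 == -1 || decide (iv.2 < st.2)) then iv else st) (b, bv)).1 = j := by
  intro l
  induction l with
  | nil =>
    intro b bv _ _ hjmem _ _
    rcases hjmem with h | ⟨h, _⟩
    · simp at h
    · simpa using h
  | cons iv rest ih =>
    intro b bv hpw hb hjmem hmin hminb
    rcases List.pairwise_cons.mp hpw with ⟨hhead, htail⟩
    obtain ⟨i, v⟩ := iv
    rw [List.foldl_cons]
    by_cases hpi : p i = true
    · have hivf : (i, v) ∈ (((i, v) :: rest).filter (fun iv => p iv.1)) :=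
        List.mem_filter.mpr ⟨List.mem_cons_self .., hpi⟩
      have hminiv := hmin (i, v) hivf
      have hfc : ((i, v) :: rest).filter (fun iv => p iv.1)
          = (i, v) :: rest.filter (fun iv => p iv.1) := by
        rw [List.filter_cons, if_pos (by simpa using hpi)]
      by_cases hcond : ((b : Int) == -1 || decide (v < bv)) = true
      · -- step taken, new best (i, v)
        have hc : (p ((i, v) : Int × Int).1
            && (((b, bv) : Int × Int).1 == -1 || decide (((i, v) : Int × Int).2 < ((b, bv) : Int × Int).2))) = true := by
          simpa using And.intro hpi hcond
        rw [if_pos hc]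
        have hjmem' : (j, vj) ∈ rest.filter (fun iv => p iv.1) ∨ (i = j ∧ v = vj) := by
          rcases hjmem with h | ⟨rfl, rfl⟩
          · rw [hfc] at h
            rcases List.mem_cons.mp h with h | h
            · have h1 := congrArg Prod.fst h
              have h2 := congrArg Prod.snd h
              exact Or.inr ⟨h1.symm, h2.symm⟩
            · exact Or.inl h
          · exfalso
            simp only [beq_iff_eq, Bool.or_eq_true, decide_eq_true_eq] at hcond
            rcases hcond with h | h
            · exact hjne h
            · rcases hminiv with h2 | ⟨h2, _⟩ <;> omega
        refine ih i v htail (Or.inr (fun x hx => hhead x hx))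
          hjmem'
          (fun x hx => hmin x (by rw [hfc]; exact List.mem_cons_of_mem _ hx)) ?_
        rcases hjmem' with _ | ⟨rfl, rfl⟩
        · rcases hminiv with h | ⟨h, h'⟩
          · exact Or.inr (Or.inl h)
          · exact Or.inr (Or.inr ⟨h, h'⟩)
        · exact Or.inr (Or.inr ⟨rfl, le_refl _⟩)
      · -- step refused: b ≠ -1 and bv ≤ v
        have hc : ¬ (p ((i, v) : Int × Int).1
            && (((b, bv) : Int × Int).1 == -1 || decide (((i, v) : Int × Int).2 < ((b, bv) : Int × Int).2))) = true := by
          simp only [Bool.and_eq_true]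
          exact fun h => hcond h.2
        rw [if_neg hc]
        have hbne : b ≠ -1 := by
          intro h; exact hcond (by simp [h])
        have hbvle : bv ≤ v := by
          simp only [beq_iff_eq, Bool.or_eq_true, decide_eq_true_eq] at hcond
          omega
        have hjmem' : (j, vj) ∈ rest.filter (fun iv => p iv.1) ∨ (b = j ∧ bv = vj) := by
          rcases hjmem with h | h
          · rw [hfc] at h
            rcases List.mem_cons.mp h with h | h
            · exfalso
              have h1 := congrArg Prod.fst h
              have h2 := congrArg Prod.snd h
              simp only at h1 h2
              subst h1; subst h2
              rcases hminb with h2 | h2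
              · exact hbne h2
              · have hblt : b < j := hb.resolve_left hbne (j, vj) (List.mem_cons_self ..)
                rcases h2 with h2 | ⟨h2, h2'⟩ <;> omega
            · exact Or.inl h
          · exact Or.inr h
        exact ih b bv htail
          (Or.inr (fun x hx => hb.resolve_left hbne x (List.mem_cons_of_mem _ hx)))
          hjmem'
          (fun x hx => hmin x (by rw [hfc]; exact List.mem_cons_of_mem _ hx))
          hminb
    · -- head invalid: state unchanged, head not in the filtered list
      have hfc : ((i, v) :: rest).filter (fun iv => p iv.1)
          = rest.filter (fun iv => p iv.1) := by
        rw [List.filter_cons, if_neg (by simpa using hpi)]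
      have hc : ¬ (p ((i, v) : Int × Int).1
          && (((b, bv) : Int × Int).1 == -1 || decide (((i, v) : Int × Int).2 < ((b, bv) : Int × Int).2))) = true := by
        simp only [Bool.and_eq_true]
        exact fun h => hpi h.1
      rw [if_neg hc]
      exact ih b bv htail
        (hb.imp id (fun h x hx => h x (List.mem_cons_of_mem _ hx)))
        (by rw [hfc] at hjmem; exact hjmem)
        (fun x hx => hmin x (by rw [hfc]; exact hx))
        hminb

lemma foldB_none (p : Int → Bool) (l : List (Int × Int)) (st : Int × Int)
    (h : ∀ iv ∈ l, p iv.1 = false) :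
    l.foldl (fun st iv =>
      if p iv.1 && (st.1 == -1 || decide (iv.2 < st.2)) then iv else st) st = st := by
  induction l generalizing st with
  | nil => rfl
  | cons iv rest ih =>
    rw [List.foldl_cons, if_neg (by simp [h iv (List.mem_cons_self ..)])]
    exact ih _ (fun x hx => h x (List.mem_cons_of_mem _ hx))

lemma mem_enumerate_of_lt (zonas : List Int) (s : Int) (k : Nat) (hk : k < zonas.length) :
    (s + (k : Int), zonas.getD k 0) ∈ PySem.List.enumerate zonas s := by
  induction zonas generalizing s k with
  | nil => simp at hk
  | cons z rest ih =>
    rw [PySem.List.enumerate_cons]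
    cases k with
    | zero => simp
    | succ m =>
      have h := ih (s + 1) m (by simpa using hk)
      refine List.mem_cons_of_mem _ ?_
      have : s + ((m : Int) + 1) = s + 1 + (m : Int) := by ring
      simpa [this] using h

lemma mem_enumerate_elim (zonas : List Int) (s : Int) (iv : Int × Int)
    (h : iv ∈ PySem.List.enumerate zonas s) :
    ∃ k : Nat, k < zonas.length ∧ iv = (s + (k : Int), zonas.getD k 0) := by
  induction zonas generalizing s with
  | nil => simp [PySem.List.enumerate] at h
  | cons z rest ih =>
    rw [PySem.List.enumerate_cons] at h
    rcases List.mem_cons.mp h with rfl | h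
    · exact ⟨0, by simp⟩
    · obtain ⟨k, hk, hiv⟩ := ih (s + 1) h
      refine ⟨k + 1, by simpa using hk, ?_⟩
      rw [hiv]
      have : s + 1 + (k : Int) = s + ((k : Int) + 1) := by ring
      simp [this]

lemma enumerate_pairwise_fst (zonas : List Int) (s : Int) :
    (PySem.List.enumerate zonas s).Pairwise (fun a b => a.1 < b.1) := by
  have hp : ((PySem.List.enumerate zonas s).map (fun x => x.1)).Pairwise (· < ·) := by
    rw [PySem.List.map_fst_enumerate]
    exact PySem.List.pairwise_lt_pyRange_one _ _
  exact List.pairwise_map.mp hp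

-- ===== VERDICT (by name: the statement is the Claim_ definition above) =====
theorem get_ideal_v1_spec : Claim_equal_get_ideal_v1 := by
  intro zonas skip _ hpre
  unfold Spec_get_ideal_v1
  simp only [get_ideal_v1, get_ideal_v1_alt]
  rw [PySem.List.slice_to_natCast]
  have hfs : FS_b.length = 9 := rfl
  rw [hfs]
  rcases hpre with h1 | ⟨j, hjn, hj9, hjskip, hjmin⟩
  · -- every index is skipped: both sides return -1
    rw [loopA_all_skip skip _ (-1) ?_,
        foldB_none (fun i => !(PySem.Set.contains (PySem.Set.ofList skip) i) && is_available_b i)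
          (PySem.List.enumerate (zonas.take 9) 0) ((-1 : Int), (0 : Int)) ?_]
    · rfl
    · intro iv hiv
      obtain ⟨k, hk, rfl⟩ := mem_enumerate_elim (zonas.take 9) 0 iv hiv
      rw [List.length_take] at hk
      have hks := h1 k (by omega)
      simp [PySem.Set.contains, List.contains_eq_mem, PySem.Set.mem_ofList, hks]
    · intro i hi
      rw [PySem.List.mem_sorted, PySem.List.mem_pyRange_one] at hi
      have h0 : (i.toNat : Int) = i := Int.toNat_of_nonneg hi.1
      have hk : i.toNat < zonas.length := by omega
      have := h1 i.toNat hk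
      rwa [h0] at this
  · -- the lexicographically least unskipped index j (< 9) is returned by both sides
    have hA : getIdealLoop skip
        (PySem.List.sorted (PySem.List.pyRange 0 (zonas.length : Int) 1)
          (fun i => PySem.List.pyGetD zonas i 0) false) (-1) = some (j : Int) := by
      apply loopA_first zonas skip _ (-1) (j : Int) (sorted_range_lex zonas _)
      · rw [PySem.List.mem_sorted, PySem.List.mem_pyRange_one]
        constructor
        · positivity
        · exact_mod_cast hjn
      · exact hjskip
      · exact avail_lt9 j hj9
      · intro i hi hiskip
        rw [PySem.List.mem_sorted, PySem.List.mem_pyRange_one] at hi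
        have h0 : (i.toNat : Int) = i := Int.toNat_of_nonneg hi.1
        have hk : i.toNat < zonas.length := by omega
        have hsk : ((i.toNat : Nat) : Int) ∉ skip := by rwa [h0]
        have hm := hjmin i.toNat hk hsk
        rw [← h0]
        simp only [PySem.List.pyGetD_natCast]
        omega
    have hjp : ((fun i => !(PySem.Set.contains (PySem.Set.ofList skip) i) && is_available_b i)
        ((j : Nat) : Int)) = true := by
      simp [PySem.Set.contains, List.contains_eq_mem, PySem.Set.mem_ofList, hjskip,
        availb_lt9 j hj9]
    have htk : ∀ k : Nat, k < 9 → (zonas.take 9).getD k 0 = zonas.getD k 0 := by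
      intro k hk
      simp [List.getD, hk]
    have hB : ((PySem.List.enumerate (zonas.take 9) 0).foldl
        (fun (st : Int × Int) iv =>
          if !(PySem.Set.contains (PySem.Set.ofList skip) iv.1) && is_available_b iv.1
              && (st.1 == -1 || decide (iv.2 < st.2)) then iv else st)
        (-1, 0)).1 = (j : Int) := by
      refine foldB_min (fun i => !(PySem.Set.contains (PySem.Set.ofList skip) i) && is_available_b i)
        ((j : Nat) : Int) ((zonas.take 9).getD j 0) hjp (by omega)
        (PySem.List.enumerate (zonas.take 9) 0) (-1) 0
        (enumerate_pairwise_fst (zonas.take 9) 0) (Or.inl rfl) ?_ ?_ (Or.inl rfl)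
      · refine Or.inl (List.mem_filter.mpr ⟨?_, hjp⟩)
        have := mem_enumerate_of_lt (zonas.take 9) 0 j (by rw [List.length_take]; omega)
        simpa using this
      · intro iv hiv
        rcases List.mem_filter.mp hiv with ⟨hmem, hp⟩
        obtain ⟨k, hk, rfl⟩ := mem_enumerate_elim (zonas.take 9) 0 iv hmem
        rw [List.length_take] at hk
        have hks : ((k : Nat) : Int) ∉ skip := by
          simp only [Bool.and_eq_true] at hp
          have := hp.1
          simp only [zero_add] at this
          simpa [PySem.Set.contains, List.contains_eq_mem, PySem.Set.mem_ofList] using this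
        have hm := hjmin k (by omega) hks
        simp only [zero_add]
        rw [htk j hj9, htk k (by omega)]
        omega
    rw [hA, hB]
    rfl
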